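-- pv_equiv track=rewrite | github.com/IBM/docAMR | amr_io.py | chain2triples
-- ===== SOURCE A (Python) =====
-- def chain2triples(chain):
--     #chains of coref (sentence id, node variable, concept)
--
--     triples = []
--     sorted_chain = sorted(chain, key=lambda x: x[0])
--
--     candidate_refs = []
--     for ref in sorted_chain:
--         if ref[3] == ':same-as':
--             candidate_refs.append(ref)
--             break #first explicite member in the chain will be main reference
--     if len(candidate_refs) == 0:
--         candidate_refs.append(sorted_chain[0])
--     ref_node = None
--     for ref in sorted_chain:
--         node = str(ref[1])+"."+ref[2]
--         rel = ref[3]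
--         if ref_node is not None:
--             triples.append((node, rel, ref_node))
--         if ref in candidate_refs:
--             ref_node = node
--
--     return (triples, ref_node)
-- ===== SOURCE B (Python) =====
-- def _node(e):
--     return str(e[1]) + "." + e[2]
--
--
-- def _emit(rest, ref_node):
--     # recursively emit one triple per remaining element, all pointing at ref_node
--     if not rest:
--         return []
--     return [(_node(rest[0]), rest[0][3], ref_node)] + _emit(rest[1:], ref_node)
--
--
-- def _resolve(sc):
--     # recursive descent: drop elements until the reference is at the head.
--     # The head is the reference iff it is ':same-as', or no ':same-as' follows
--     # (then we are still at the start of the chain and the first element rules).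
--     head, tail = sc[0], sc[1:]
--     if head[3] == ':same-as' or all(e[3] != ':same-as' for e in tail):
--         ref_node = _node(head)
--         return (_emit(tail, ref_node), ref_node)
--     return _resolve(tail)
--
--
-- def chain2triples(chain):
--     return _resolve(sorted(chain, key=lambda x: x[0]))
-- ===== Notes on version B (the rewrite author's own statement) =====
-- stated objective: alternative
-- what changed: Replaces A's candidate-list construction plus a stateful full-chain fold threading a mutable ref_node with a recursive descent that discards the prefix before the reference (head is the reference iff it is ':same-as' or no ':same-as' follows) and then recursively emits one triple per remaining element.
import Mathlib
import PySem

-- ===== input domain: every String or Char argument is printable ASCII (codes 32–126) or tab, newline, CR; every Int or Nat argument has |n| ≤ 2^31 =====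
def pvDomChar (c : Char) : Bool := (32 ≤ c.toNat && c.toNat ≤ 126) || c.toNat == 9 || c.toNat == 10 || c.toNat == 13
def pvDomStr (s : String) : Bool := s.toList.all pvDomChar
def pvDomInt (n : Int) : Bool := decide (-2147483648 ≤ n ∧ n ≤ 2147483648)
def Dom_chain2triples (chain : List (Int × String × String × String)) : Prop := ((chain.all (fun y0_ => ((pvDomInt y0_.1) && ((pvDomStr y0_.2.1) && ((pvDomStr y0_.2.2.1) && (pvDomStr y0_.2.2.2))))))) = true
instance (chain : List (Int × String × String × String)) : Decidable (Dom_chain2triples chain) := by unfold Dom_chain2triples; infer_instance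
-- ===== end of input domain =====

-- B replaces A's candidate-list build plus stateful fold with a recursive descent that drops the
-- prefix before the reference and then recursively emits the remaining triples (alternative shape).

-- node string str(ref[1]) + "." + ref[2] (ref[1] is already a str here)
def pvNode (r : Int × String × String × String) : String := r.2.1 ++ "." ++ r.2.2.1

-- ===== PORT A =====
-- the 'for ref in sorted_chain: if ref[3] == ':same-as': append; break' loop
def findSameAs : List (Int × String × String × String) → List (Int × String × String × String)
  | [] => []
  | r :: rest => if r.2.2.2 = ":same-as" then [r] else findSameAs rest

-- the body of A's second 'for ref in sorted_chain' loop (state = (triples, ref_node))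
def stepA (cand : List (Int × String × String × String))
    (st : List (String × String × String) × Option String)
    (ref : Int × String × String × String) :
    List (String × String × String) × Option String :=
  let node := pvNode ref
  let rel := ref.2.2.2
  let triples := match st.2 with
    | some rn => st.1 ++ [(node, rel, rn)]
    | none => st.1
  let rn := if ref ∈ cand then some node else st.2
  (triples, rn)

def chain2triples (chain : List (Int × String × String × String)) : (List (String × String × String)) × Option String :=
  let sorted_chain := PySem.List.sorted chain (fun x => x.1) false
  let candidate_refs := findSameAs sorted_chain
  let candidate_refs :=
    if candidate_refs.length = 0 then
      match PySem.List.pyGet? sorted_chain 0 with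
      | some x => [x]
      | none => []   -- Python raises IndexError here (empty chain); excluded by Pre_
    else candidate_refs
  sorted_chain.foldl (stepA candidate_refs) ([], none)

-- ===== PORT B =====
-- _emit: recursively build one triple per remaining element
def bEmit (rest : List (Int × String × String × String)) (refNode : String) :
    List (String × String × String) :=
  match rest with
  | [] => []
  | e :: rs => [(pvNode e, e.2.2.2, refNode)] ++ bEmit rs refNode

-- _resolve: recursive descent dropping elements until the reference is at the head
def bResolve : List (Int × String × String × String) → (List (String × String × String)) × Option String
  | [] => ([], none)   -- Python raises IndexError here (sc[0] on empty list); excluded by Pre_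
  | head :: tail =>
    if head.2.2.2 = ":same-as" ∨ tail.all (fun e => e.2.2.2 ≠ ":same-as") then
      let refNode := pvNode head
      (bEmit tail refNode, some refNode)
    else bResolve tail

def chain2triples_alt (chain : List (Int × String × String × String)) : (List (String × String × String)) × Option String :=
  bResolve (PySem.List.sorted chain (fun x => x.1) false)

-- ===== PRECONDITION & SPEC =====
-- Pre_ excludes only the empty chain, on which A raises IndexError (sorted_chain[0]); B raises there too.
def Pre_chain2triples (chain : List (Int × String × String × String)) : Prop := chain ≠ []
instance (chain : List (Int × String × String × String)) : Decidable (Pre_chain2triples chain) := by unfold Pre_chain2triples; infer_instance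
def pvWitness_chain2triples : (List (Int × String × String × String)) := [(1, "a", "c", ":same-as"), (0, "b", "d", ":coref")]
def Spec_chain2triples (chain : List (Int × String × String × String)) (out : (List (String × String × String)) × Option String) : Prop := out = chain2triples_alt chain
instance (chain : List (Int × String × String × String)) (out : (List (String × String × String)) × Option String) : Decidable (Spec_chain2triples chain out) := by unfold Spec_chain2triples; infer_instance

-- ===== CLAIM (what is proved, stated in full; the proofs are below) =====
def Claim_equal_chain2triples : Prop := ∀ (chain : List (Int × String × String × String)), Dom_chain2triples chain → Pre_chain2triples chain → Spec_chain2triples chain (chain2triples chain)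

-- ===== LEMMAS AND PROOFS =====

-- B's _emit is pointwise mapping
lemma bEmit_eq_map (l : List (Int × String × String × String)) (rn : String) :
    bEmit l rn = l.map (fun e => (pvNode e, e.2.2.2, rn)) := by
  induction l with
  | nil => rfl
  | cons e rs ih => simp [bEmit, ih]

-- suffix: once ref_node = pvNode c and the candidate list is [c], every element appends its triple
lemma foldA_suffix (c : Int × String × String × String)
    (l : List (Int × String × String × String)) (ts : List (String × String × String)) :
    l.foldl (stepA [c]) (ts, some (pvNode c)) =
      (ts ++ l.map (fun e => (pvNode e, e.2.2.2, pvNode c)), some (pvNode c)) := by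
  induction l generalizing ts with
  | nil => simp
  | cons r rest ih =>
    by_cases hr : r = c
    · subst hr
      simp [List.foldl_cons, stepA, ih]
    · simp [List.foldl_cons, stepA, hr, ih]

-- no ':same-as' element ⇒ A's break-loop finds nothing
lemma findSameAs_nil_of_all (l : List (Int × String × String × String))
    (h : l.all (fun e => e.2.2.2 ≠ ":same-as") = true) : findSameAs l = [] := by
  induction l with
  | nil => rfl
  | cons r rest ih =>
    simp only [List.all_cons, Bool.and_eq_true, decide_eq_true_eq] at h
    simp [findSameAs, h.1, ih h.2]

-- some ':same-as' element ⇒ A's break-loop finds exactly one, a ':same-as' element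
lemma findSameAs_of_exists (l : List (Int × String × String × String))
    (h : ¬ l.all (fun e => e.2.2.2 ≠ ":same-as") = true) :
    ∃ c, findSameAs l = [c] ∧ c.2.2.2 = ":same-as" := by
  induction l with
  | nil => simp at h
  | cons r rest ih =>
    by_cases hr : r.2.2.2 = ":same-as"
    · exact ⟨r, by simp [findSameAs, hr], hr⟩
    · simp only [List.all_cons, Bool.and_eq_true, decide_eq_true_eq] at h
      push Not at h
      obtain ⟨c, hc1, hc2⟩ := ih (by simpa using h hr)
      exact ⟨c, by simp [findSameAs, hr, hc1], hc2⟩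

-- the core agreement, on the already-sorted list
lemma ports_agree (l : List (Int × String × String × String)) (hne : l ≠ []) :
    (let cand0 := findSameAs l
     let cand := if cand0.length = 0 then
        (match PySem.List.pyGet? l 0 with | some x => [x] | none => [])
       else cand0
     l.foldl (stepA cand) ([], none))
    = bResolve l := by
  induction l with
  | nil => exact absurd rfl hne
  | cons r rest ih =>
    by_cases hr : r.2.2.2 = ":same-as"
    · -- reference is the head, found explicitly
      simp only [findSameAs, hr]
      simp [bResolve, hr, List.foldl_cons, stepA, foldA_suffix, bEmit_eq_map]
    · by_cases hall : rest.all (fun e => e.2.2.2 ≠ ":same-as") = true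
      · -- no ':same-as' anywhere: reference is the head via sorted_chain[0]
        have hfs : findSameAs (r :: rest) = [] := by
          simp [findSameAs, hr, findSameAs_nil_of_all rest hall]
        have hb : bResolve (r :: rest) = (bEmit rest (pvNode r), some (pvNode r)) := by
          simp only [bResolve]
          rw [if_pos (Or.inr hall)]
        simp only [hfs, List.length_nil, reduceIte, PySem.List.pyGet?_zero_cons]
        rw [hb, bEmit_eq_map]
        simp [List.foldl_cons, stepA, foldA_suffix]
      · -- a ':same-as' exists in the tail: both sides discard the head
        obtain ⟨c, hc1, hc2⟩ := findSameAs_of_exists rest hall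
        have hfs : findSameAs (r :: rest) = [c] := by simp [findSameAs, hr, hc1]
        have hrc : r ∉ [c] := by
          simp; intro h; rw [h] at hr; exact hr hc2
        have hrestne : rest ≠ [] := by
          intro h; rw [h] at hc1; simp [findSameAs] at hc1
        have hstep : stepA [c] ([], none) r = ([], none) := by simp [stepA, hrc]
        have hb : bResolve (r :: rest) = bResolve rest := by
          simp only [bResolve]
          rw [if_neg (by rintro (h | h); exacts [hr h, hall h])]
        have hrest := ih hrestne
        simp only [hc1, List.length_cons] at hrest
        norm_num at hrest
        simp only [hfs, List.length_cons, List.foldl_cons]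
        norm_num
        rw [hstep, hrest, hb]

-- ===== VERDICT (by name: the statement is the Claim_ definition above) =====
theorem chain2triples_spec : Claim_equal_chain2triples := by
  intro chain _ hpre
  unfold Spec_chain2triples chain2triples chain2triples_alt
  have hne : PySem.List.sorted chain (fun x => x.1) false ≠ [] := by
    intro h
    have := PySem.List.length_sorted (xs := chain) (key := fun x : Int × String × String × String => x.1) (rev := false)
    rw [h] at this
    exact hpre (List.eq_nil_of_length_eq_zero this.symm)
  exact ports_agree _ hne
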